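-- pv_equiv track=rewrite | github.com/Lthek55/BackJoon_Algorithm_JS | 프로그래머스/unrated/181859. 배열 만들기 6/배열 만들기 6.py | solution
-- ===== SOURCE A (Python) =====
-- def solution(arr):
--     i = 0
--     stk = []
--
--     # [0, 1, 0, 0]
--     # 0 > stk 0
--     # 1 > stk 0, 1
--     # 2 > stk 0, 1 ,0
--     # 3 > stk 0,1
--     while i < len(arr):
--         if len(stk) == 0:
--             stk.append(arr[i])
--             i+=1
--
--         elif len(stk) != 0 and stk[-1] == arr[i]:
--             stk.pop()
--             i+=1
--
--         elif len(stk) != 0 and stk[-1] != arr[i]: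
--             stk.append(arr[i])
--             i+=1
--
--     return [-1] if len(stk) == 0 else stk
-- ===== SOURCE B (Python) =====
-- def solution(arr):
--     res = list(arr)
--     while True:
--         for j in range(len(res) - 1):
--             if res[j] == res[j + 1]:
--                 del res[j:j + 2]
--                 break
--         else:
--             break
--     return [-1] if not res else res
-- ===== Notes on version B (the rewrite author's own statement) =====
-- stated objective: alternative
-- what changed: Replaced the single left-to-right stack pass by a fixed-point reduction that repeatedly deletes the first adjacent equal pair until no pair remains (relying on confluence of adjacent-pair removal).
import Mathlib
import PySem

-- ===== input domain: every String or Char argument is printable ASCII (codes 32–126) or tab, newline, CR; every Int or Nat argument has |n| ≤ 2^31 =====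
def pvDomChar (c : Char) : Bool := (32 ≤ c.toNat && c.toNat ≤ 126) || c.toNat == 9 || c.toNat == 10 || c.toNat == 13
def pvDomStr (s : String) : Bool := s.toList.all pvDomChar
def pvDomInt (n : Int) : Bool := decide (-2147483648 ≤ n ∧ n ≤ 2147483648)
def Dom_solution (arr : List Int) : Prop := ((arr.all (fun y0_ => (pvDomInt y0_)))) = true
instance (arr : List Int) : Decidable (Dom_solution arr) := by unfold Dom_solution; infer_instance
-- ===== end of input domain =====

-- B is an alternative algorithm of the same task (a fixed-point 'delete the first adjacent
-- equal pair until none remains' loop instead of A's one stack pass); same cost class in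
-- practice is not claimed — objective: alternative.

-- ===== PORT A =====
-- A's while-loop over i with the Python list 'stk'. The stack is represented top-at-head
-- (Python's 'stk' is 'stk.reverse' here: append = cons, stk[-1] = head, pop = tail); the
-- final result reverses back, so the returned value is exactly Python's.
def solLoop : List Int → List Int → List Int
  | stk, [] => stk
  | stk, x :: xs =>
    if stk.length = 0 then solLoop (x :: stk) xs
    else if stk.head? = some x then solLoop stk.tail xs
    else solLoop (x :: stk) xs

def solution (arr : List Int) : List Int :=
  let stk := solLoop [] arr
  if stk.length = 0 then [-1] else stk.reverse

-- ===== PORT B =====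
-- inner 'for j in range(len(res)-1)' scan: index of the first adjacent equal pair, if any
def findPair : List Int → Option Nat
  | x :: y :: t => if x = y then some 0 else (findPair (y :: t)).map (· + 1)
  | _ => none

theorem findPair_lt : ∀ (r : List Int) (j : Nat), findPair r = some j → j + 1 < r.length := by
  intro r
  induction r with
  | nil => intro j h; simp [findPair] at h
  | cons x t ih =>
    intro j h
    match t with
    | [] => simp [findPair] at h
    | y :: t' =>
      by_cases hxy : x = y
      · simp [findPair, hxy] at h
        subst h
        simp [List.length_cons]
      · simp [findPair, hxy] at h
        obtain ⟨j', hj', rfl⟩ := h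
        have := ih j' hj'
        simp [List.length_cons] at this ⊢
        omega

-- the outer 'while True' loop: del res[j:j+2] and rescan, until no pair is found
def reduceLoop (r : List Int) : List Int :=
  match h : findPair r with
  | none => r      -- 'for' loop fell through: no pair, the 'while' stops
  | some j => reduceLoop (r.take j ++ r.drop (j + 2))
termination_by r.length
decreasing_by
  have := findPair_lt r j h
  simp [List.length_append, List.length_take, List.length_drop]
  omega

def solution_alt (arr : List Int) : List Int :=
  let res := reduceLoop arr
  if res.length = 0 then [-1] else res

-- ===== PRECONDITION & SPEC =====
def Spec_solution (arr : List Int) (out : List Int) : Prop := out = solution_alt arr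
instance (arr : List Int) (out : List Int) : Decidable (Spec_solution arr out) := by unfold Spec_solution; infer_instance

-- ===== CLAIM (what is proved, stated in full; the proofs are below) =====
def Claim_equal_solution : Prop := ∀ (arr : List Int), Dom_solution arr → Spec_solution arr (solution arr)

-- ===== LEMMAS AND PROOFS =====

-- 'reduced' = no two adjacent equal elements
def Red (l : List Int) : Prop := List.IsChain (· ≠ ·) l

-- one right-fold cancellation step, and the normal form nf
def stp (x : Int) (r : List Int) : List Int :=
  match r with
  | [] => [x]
  | y :: ys => if x = y then ys else x :: y :: ys

def nf (l : List Int) : List Int := l.foldr stp []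

theorem stp_red {r : List Int} (h : Red r) (x : Int) : Red (stp x r) := by
  match r with
  | [] => exact List.IsChain.singleton x
  | y :: ys =>
    by_cases hxy : x = y
    · simpa [stp, hxy, Red] using (List.isChain_cons.mp h).2
    · simp only [stp, if_neg hxy]
      refine List.isChain_cons.mpr ⟨?_, h⟩
      intro z hz; simp at hz; subst hz; exact hxy

theorem nf_red (l : List Int) : Red (nf l) := by
  induction l with
  | nil => exact List.IsChain.nil
  | cons x xs ih => simpa [nf] using stp_red ih x

theorem stp_stp {r : List Int} (h : Red r) (x : Int) : stp x (stp x r) = r := by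
  match r with
  | [] => simp [stp]
  | y :: ys =>
    by_cases hxy : x = y
    · subst hxy
      have hy : ∀ z ∈ ys.head?, x ≠ z := (List.isChain_cons.mp h).1
      simp only [stp]
      norm_num
      match ys with
      | [] => norm_num [stp]
      | z :: zs =>
        have hxz : x ≠ z := hy z rfl
        simp [hxz]
    · simp [stp, hxy]

theorem red_nf_self {l : List Int} (h : Red l) : nf l = l := by
  induction l with
  | nil => simp [nf]
  | cons x xs ih =>
    have hx : ∀ z ∈ xs.head?, x ≠ z := (List.isChain_cons.mp h).1
    have h2 : nf xs = xs := ih (List.isChain_cons.mp h).2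
    simp only [nf, List.foldr] at h2 ⊢
    rw [h2]
    match xs with
    | [] => simp [stp]
    | z :: zs => simp [stp, hx z rfl]

theorem findPair_none_red {r : List Int} (h : findPair r = none) : Red r := by
  induction r with
  | nil => exact List.IsChain.nil
  | cons x t ih =>
    match t with
    | [] => exact List.IsChain.singleton x
    | y :: t' =>
      by_cases hxy : x = y
      · simp [findPair, hxy] at h
      · simp [findPair, hxy] at h
        refine List.isChain_cons.mpr ⟨?_, ih h⟩
        intro z hz; simp at hz; subst hz; exact hxy

theorem findPair_some_nf : ∀ (r : List Int) (j : Nat), findPair r = some j →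
    nf (r.take j ++ r.drop (j + 2)) = nf r := by
  intro r
  induction r with
  | nil => intro j h; simp [findPair] at h
  | cons x t ih =>
    intro j h
    match t with
    | [] => simp [findPair] at h
    | y :: t' =>
      by_cases hxy : x = y
      · simp [findPair, hxy] at h
        subst h
        subst hxy
        show nf t' = nf (x :: x :: t')
        have hstep : nf (x :: x :: t') = stp x (stp x (nf t')) := by simp [nf]
        rw [hstep, stp_stp (nf_red t')]
      · simp [findPair, hxy] at h
        obtain ⟨j', hj', rfl⟩ := h
        have hrec := ih j' hj'
        show nf (x :: (List.take j' (y :: t') ++ List.drop (j' + 2) (y :: t'))) = nf (x :: y :: t')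
        simp only [nf, List.foldr_cons] at hrec ⊢
        rw [hrec]

theorem reduceLoop_eq_nf_aux : ∀ (n : Nat) (r : List Int), r.length ≤ n → reduceLoop r = nf r := by
  intro n
  induction n with
  | zero =>
    intro r hr
    have : r = [] := List.eq_nil_of_length_eq_zero (Nat.le_zero.mp hr)
    subst this
    simp [reduceLoop, findPair, nf]
  | succ n ih =>
    intro r hr
    rw [reduceLoop]
    split
    · next h => exact (red_nf_self (findPair_none_red h)).symm
    · next j h =>
      have hlt := findPair_lt r j h
      have hlen : (List.take j r ++ List.drop (j + 2) r).length ≤ n := by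
        simp [List.length_append, List.length_take, List.length_drop]
        omega
      rw [ih _ hlen]
      exact findPair_some_nf r j h

theorem reduceLoop_eq_nf (r : List Int) : reduceLoop r = nf r :=
  reduceLoop_eq_nf_aux r.length r le_rfl

-- A-side: one push step of the stack loop
def pushA (x : Int) (s : List Int) : List Int :=
  if s.head? = some x then s.tail else x :: s

theorem solLoop_cons (s : List Int) (x : Int) (xs : List Int) :
    solLoop s (x :: xs) = solLoop (pushA x s) xs := by
  match s with
  | [] => simp [solLoop, pushA]
  | z :: zs =>
    by_cases hzx : z = x
    · simp [solLoop, pushA, hzx]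
    · simp [solLoop, pushA, hzx]

theorem pushA_red {s : List Int} (h : Red s) (x : Int) : Red (pushA x s) := by
  match s with
  | [] => exact List.IsChain.singleton x
  | z :: zs =>
    by_cases hzx : z = x
    · simpa [pushA, hzx, Red] using (List.isChain_cons.mp h).2
    · simp only [pushA, List.head?_cons, Option.some.injEq, if_neg hzx]
      refine List.isChain_cons.mpr ⟨?_, h⟩
      intro w hw; simp at hw; subst hw; exact Ne.symm hzx

theorem pushA_stp {s r : List Int} (hs : Red s) (hr : Red r) (x : Int) :
    solLoop (pushA x s) r = solLoop s (stp x r) := by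
  match r with
  | [] =>
    show solLoop (pushA x s) [] = solLoop s [x]
    rw [solLoop_cons]
  | y :: ys =>
    by_cases hxy : x = y
    · subst hxy
      simp only [stp]
      norm_num
      rw [solLoop_cons]
      congr 1
      -- pushA x (pushA x s) = s, for reduced s
      match s with
      | [] => simp [pushA]
      | z :: zs =>
        by_cases hzx : z = x
        · subst hzx
          have hz : ∀ w ∈ zs.head?, z ≠ w := (List.isChain_cons.mp hs).1
          simp only [pushA, List.head?_cons, List.tail_cons]
          norm_num
          match zs with
          | [] => simp
          | w :: ws => simp [Ne.symm (hz w rfl)]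
        · simp [pushA, hzx]
    · simp only [stp, if_neg hxy]
      rw [solLoop_cons (s := s) (x := x) (xs := y :: ys)]

theorem solLoop_nf {s : List Int} (xs : List Int) (hs : Red s) :
    solLoop s xs = solLoop s (nf xs) := by
  induction xs generalizing s with
  | nil => simp [nf]
  | cons x xs ih =>
    rw [solLoop_cons, ih (pushA_red hs x), pushA_stp hs (nf_red xs) x]
    rfl

theorem solLoop_red_eval : ∀ (r s : List Int), Red (r.reverse ++ s) → solLoop s r = r.reverse ++ s := by
  intro r
  induction r with
  | nil => intro s h; simp [solLoop]
  | cons x xs ih =>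
    intro s h
    have h' : Red (xs.reverse ++ (x :: s)) := by simpa using h
    have hxs : ∀ z ∈ s.head?, x ≠ z := by
      have hsuf : Red (x :: s) := List.IsChain.suffix h' (List.suffix_append _ _)
      exact (List.isChain_cons.mp hsuf).1
    have hpush : pushA x s = x :: s := by
      match s with
      | [] => simp [pushA]
      | z :: zs => simp [pushA, Ne.symm (hxs z rfl)]
    rw [solLoop_cons, hpush, ih (x :: s) h']
    simp

theorem red_reverse {l : List Int} (h : Red l) : Red l.reverse := by
  rw [Red, List.isChain_reverse]
  exact h.imp (fun a b hne => Ne.symm hne)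

theorem solLoop_main (arr : List Int) : solLoop [] arr = (nf arr).reverse := by
  rw [solLoop_nf arr List.IsChain.nil]
  have := solLoop_red_eval (nf arr) [] (by simpa using red_reverse (nf_red arr))
  simpa using this

-- ===== VERDICT (by name: the statement is the Claim_ definition above) =====
theorem solution_spec : Claim_equal_solution := by
  intro arr _
  show solution arr = solution_alt arr
  simp only [solution, solution_alt, solLoop_main, reduceLoop_eq_nf]
  by_cases h : (nf arr).length = 0
  · simp [h]
  · simp [h]
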